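-- pv_equiv track=rewrite | github.com/gabrielsecco22/advent_of_code | 2022/matrix_traversal/cost_traversal.py | get_permutations_under_cost_limit
-- ===== SOURCE A (Python) =====
-- def get_permutations_under_cost_limit(cost_limit, nodes):
--     def r(cost=0, path=[]):
--         if cost > cost_limit:
--             return
--         if path:
--             yield cost, path
--         for node in nodes:
--             if node in path:
--                 continue
--             yield from r(cost + nodes[node], path + [node])
--
--     return {k: v for k, v in r()}
-- ===== SOURCE B (Python) =====
-- def get_permutations_under_cost_limit(cost_limit, nodes):
--     result = {}
--     stack = [(0, [])]
--     while stack: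
--         cost, path = stack.pop()
--         if cost > cost_limit:
--             continue
--         if path:
--             result[cost] = path
--         for node in reversed(nodes):
--             if node not in path:
--                 stack.append((cost + nodes[node], path + [node]))
--     return result
-- ===== Notes on version B (the rewrite author's own statement) =====
-- stated objective: alternative
-- what changed: Replaced the recursive generator plus dict-comprehension with an iterative pre-order DFS over an explicit LIFO stack that writes into the result dict as frames are popped (children pushed in reverse key order so they are popped in forward order, preserving the emission sequence and thus the last-writer-wins dict).
import Mathlib
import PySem

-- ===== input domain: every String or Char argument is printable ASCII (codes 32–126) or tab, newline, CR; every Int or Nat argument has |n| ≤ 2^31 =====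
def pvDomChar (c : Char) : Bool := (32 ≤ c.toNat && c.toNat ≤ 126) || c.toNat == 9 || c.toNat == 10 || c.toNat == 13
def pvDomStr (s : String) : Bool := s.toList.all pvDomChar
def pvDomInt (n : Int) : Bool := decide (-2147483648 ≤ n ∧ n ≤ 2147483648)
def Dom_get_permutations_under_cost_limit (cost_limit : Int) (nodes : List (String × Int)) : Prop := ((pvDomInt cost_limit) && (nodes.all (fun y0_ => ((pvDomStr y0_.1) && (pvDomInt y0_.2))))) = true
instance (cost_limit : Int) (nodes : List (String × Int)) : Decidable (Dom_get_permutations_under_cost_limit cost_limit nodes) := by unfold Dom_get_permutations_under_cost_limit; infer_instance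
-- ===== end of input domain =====

-- B replaces the recursive generator + dict comprehension by an explicit-stack iterative
-- pre-order DFS writing into the result dict as frames are popped (same cost, different structure).


-- ===== PORT A =====
-- A's recursive generator r(cost, path): prune if cost > cost_limit, yield (cost, path) when
-- path is non-empty, then for each dict key not in path recurse with cost+value, path+[key].
-- Fuel (number of keys) + 1 bounds the recursion depth exactly: each recursive call adds a
-- fresh key to path (the keys of the dict are distinct), so the fuel is never exhausted.
def pvEmitA (cl : Int) (nd : List (String × Int)) : Nat → Int → List String → List (Int × List String)
  | 0, _, _ => []
  | f+1, cost, path =>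
    if cl < cost then []
    else
      (if path = [] then [] else [(cost, path)]) ++
      nd.flatMap (fun kv =>
        if path.contains kv.1 then []
        else pvEmitA cl nd f (cost + kv.2) (path ++ [kv.1]))

def get_permutations_under_cost_limit (cost_limit : Int) (nodes : List (String × Int)) : List (Int × List String) :=
  -- 'nodes' is a Python dict: normalise the association list exactly as dict(...) does
  let nd := (PySem.Dict.ofList nodes).items
  -- {k: v for k, v in r()} : left fold of insert over the emitted (cost, path) pairs
  ((pvEmitA cost_limit nd (nd.length + 1) 0 []).foldl
      (fun d p => d.insert p.1 p.2) PySem.Dict.empty).items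

-- ===== PORT B =====
-- loop-count weight used as fuel for B's while loop: pvW k bounds the number of iterations
-- a frame with k still-usable keys can generate (1 + k * pvW (k-1)); never exhausted.
def pvW : Nat → Nat
  | 0 => 1
  | k+1 => 1 + (k+1) * pvW k

-- B's while loop: pop (cost, path); prune; record result[cost] = path; push the children
-- 'for node in reversed(nodes)' (so they are popped in forward key order).
def pvLoopB (cl : Int) (nd : List (String × Int)) :
    Nat → List (Int × List String) → PySem.Dict Int (List String) → PySem.Dict Int (List String)
  | 0, _, res => res
  | _+1, [], res => res
  | f+1, (cost, path) :: rest, res =>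
    if cl < cost then pvLoopB cl nd f rest res
    else
      let res' := if path = [] then res else res.insert cost path
      let stack' := nd.reverse.foldl
        (fun st kv => if path.contains kv.1 then st else (cost + kv.2, path ++ [kv.1]) :: st) rest
      pvLoopB cl nd f stack' res'

def get_permutations_under_cost_limit_alt (cost_limit : Int) (nodes : List (String × Int)) : List (Int × List String) :=
  let nd := (PySem.Dict.ofList nodes).items
  (pvLoopB cost_limit nd (pvW nd.length) [(0, [])] PySem.Dict.empty).items

-- ===== PRECONDITION & SPEC =====
def Spec_get_permutations_under_cost_limit (cost_limit : Int) (nodes : List (String × Int)) (out : List (Int × List String)) : Prop := out = get_permutations_under_cost_limit_alt cost_limit nodes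
instance (cost_limit : Int) (nodes : List (String × Int)) (out : List (Int × List String)) : Decidable (Spec_get_permutations_under_cost_limit cost_limit nodes out) := by unfold Spec_get_permutations_under_cost_limit; infer_instance

-- ===== CLAIM (what is proved, stated in full; the proofs are below) =====
def Claim_equal_get_permutations_under_cost_limit : Prop := ∀ (cost_limit : Int) (nodes : List (String × Int)), Dom_get_permutations_under_cost_limit cost_limit nodes → Spec_get_permutations_under_cost_limit cost_limit nodes (get_permutations_under_cost_limit cost_limit nodes)

-- ===== LEMMAS AND PROOFS =====

-- number of keys of nd not yet in path
def pvCount (nd : List (String × Int)) (path : List String) : Nat :=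
  (nd.filter (fun kv => !path.contains kv.1)).length

theorem pvW_pos (k : Nat) : 1 ≤ pvW k := by
  cases k <;> simp [pvW]

-- B's push loop over reversed(nodes) builds (filtered children, forward order) ++ rest
theorem pvPush_eq (p : List String) (cost : Int) (nd : List (String × Int))
    (rest : List (Int × List String)) :
    nd.reverse.foldl
        (fun st kv => if p.contains kv.1 then st else (cost + kv.2, p ++ [kv.1]) :: st) rest
      = ((nd.filter (fun kv => !p.contains kv.1)).map (fun kv => (cost + kv.2, p ++ [kv.1]))) ++ rest := by
  induction nd with
  | nil => simp
  | cons a l ih =>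
    simp only [List.reverse_cons, List.foldl_append, List.foldl_cons, List.foldl_nil, ih,
      List.filter_cons]
    by_cases h : a.1 ∈ p <;> simp [h]

theorem pvFlatMap_if_filter {α β : Type} (l : List α) (q : α → Bool) (g : α → List β) :
    l.flatMap (fun x => if q x then [] else g x) = (l.filter (fun x => !q x)).flatMap g := by
  induction l with
  | nil => rfl
  | cons a l ih =>
    by_cases h : q a <;> simp [h, ih]

theorem pvFlatMap_congr {α β : Type} (l : List α) (f g : α → List β)
    (h : ∀ x ∈ l, f x = g x) : l.flatMap f = l.flatMap g := by
  induction l with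
  | nil => rfl
  | cons a l ih =>
    simp only [List.flatMap_cons, h a (by simp), ih (fun x hx => h x (by simp [hx]))]

-- removing one present element from a list with distinct keys drops the length by exactly one
theorem pvFilter_ne_length {ν : Type} (F : List (String × ν)) (kv : String × ν)
    (hnd : (F.map Prod.fst).Nodup) (hmem : kv ∈ F) :
    (F.filter (fun x => !(x.1 == kv.1))).length = F.length - 1 := by
  induction F with
  | nil => cases hmem
  | cons a l ih =>
    simp only [List.map_cons, List.nodup_cons] at hnd
    rcases List.mem_cons.mp hmem with h | h
    · subst h
      have hall : ∀ x ∈ l, (!(x.1 == kv.1)) = true := by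
        intro x hx
        simp only [Bool.not_eq_eq_eq_not, Bool.not_true, beq_eq_false_iff_ne]
        intro hxa
        exact hnd.1 (hxa ▸ List.mem_map.mpr ⟨x, hx, rfl⟩)
      simp [List.filter_congr hall]
    · have ha : (a.1 == kv.1) = false := by
        simp only [beq_eq_false_iff_ne]
        intro he
        exact hnd.1 (he ▸ List.mem_map.mpr ⟨kv, h, rfl⟩)
      have hlp : 0 < l.length := List.length_pos_of_mem h
      have := ih hnd.2 h
      simp only [List.filter_cons, ha, Bool.not_false, if_true, List.length_cons, this,
        List.length_cons]
      omega

-- the exact child count: extending path by a still-available key drops pvCount by one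
theorem pvCount_snoc (nd : List (String × Int)) (p : List String) (kv : String × Int)
    (hnd : (nd.map Prod.fst).Nodup)
    (hkv : kv ∈ nd.filter (fun x => !p.contains x.1)) :
    pvCount nd (p ++ [kv.1]) = pvCount nd p - 1 := by
  unfold pvCount
  have hcong : ∀ x ∈ nd, (!(p ++ [kv.1]).contains x.1)
      = ((!p.contains x.1) && !(x.1 == kv.1)) := by
    intro x _
    simp [Bool.not_or, beq_eq_decide]
  rw [List.filter_congr (fun x hx => hcong x hx)]
  have hff : nd.filter (fun x => (!p.contains x.1) && !(x.1 == kv.1))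
      = (nd.filter (fun x => !p.contains x.1)).filter (fun x => !(x.1 == kv.1)) := by
    rw [List.filter_filter]
    exact List.filter_congr (fun x _ => by simp [Bool.and_comm])
  rw [hff]
  have hsub : (nd.filter (fun x => !p.contains x.1)).Sublist nd := List.filter_sublist
  exact pvFilter_ne_length _ kv ((hsub.map Prod.fst).nodup hnd) hkv

-- the frame weights of the pushed children sum to pvW (pvCount p) - 1
theorem pvChildren_sum (nd : List (String × Int)) (p : List String) (cost : Int)
    (hnd : (nd.map Prod.fst).Nodup) :
    (((nd.filter (fun kv => !p.contains kv.1)).map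
        (fun kv => (cost + kv.2, p ++ [kv.1]))).map
          (fun fr => pvW (pvCount nd fr.2))).sum
      = pvW (pvCount nd p) - 1 := by
  have hmap : ((nd.filter (fun kv => !p.contains kv.1)).map
      (fun kv => (cost + kv.2, p ++ [kv.1]))).map (fun fr => pvW (pvCount nd fr.2))
      = (nd.filter (fun kv => !p.contains kv.1)).map
          (fun kv => pvW (pvCount nd (p ++ [kv.1]))) := by
    simp [List.map_map, Function.comp]
  rw [hmap]
  have hconst : ∀ kv ∈ nd.filter (fun kv => !p.contains kv.1),
      pvW (pvCount nd (p ++ [kv.1])) = pvW (pvCount nd p - 1) := by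
    intro kv hkv; rw [pvCount_snoc nd p kv hnd hkv]
  rw [List.map_congr_left hconst, List.map_const', List.sum_replicate, smul_eq_mul]
  have hlen : (nd.filter (fun kv => !p.contains kv.1)).length = pvCount nd p := rfl
  rw [hlen]
  cases h : pvCount nd p with
  | zero => simp [pvW]
  | succ k => simp [pvW]

-- main invariant: the stack loop computes the fold of insert over the concatenated
-- pre-order emissions of the stacked frames (with the exact per-frame fuel)
theorem pvLoopB_eq (cl : Int) (nd : List (String × Int)) (hnd : (nd.map Prod.fst).Nodup) :
    ∀ (f : Nat) (stack : List (Int × List String)) (res : PySem.Dict Int (List String)),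
      (stack.map (fun fr => pvW (pvCount nd fr.2))).sum ≤ f →
      pvLoopB cl nd f stack res
        = (stack.flatMap (fun fr => pvEmitA cl nd (pvCount nd fr.2 + 1) fr.1 fr.2)).foldl
            (fun d q => d.insert q.1 q.2) res := by
  intro f
  induction f with
  | zero =>
    intro stack res hle
    cases stack with
    | nil => rfl
    | cons fr rest =>
      exfalso
      simp only [List.map_cons, List.sum_cons] at hle
      have := pvW_pos (pvCount nd fr.2)
      omega
  | succ f ih =>
    intro stack res hle
    cases stack with
    | nil => rfl
    | cons fr rest =>
      obtain ⟨c, p⟩ := fr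
      simp only [List.map_cons, List.sum_cons] at hle
      have hpos := pvW_pos (pvCount nd p)
      by_cases hc : cl < c
      · have hL : pvLoopB cl nd (f+1) ((c, p) :: rest) res = pvLoopB cl nd f rest res := by
          simp [pvLoopB, hc]
        have hemit : pvEmitA cl nd (pvCount nd p + 1) c p = [] := by
          simp [pvEmitA, hc]
        rw [hL, ih rest res (by omega)]
        simp [hemit]
      · -- unfold one loop step
        have hL : pvLoopB cl nd (f+1) ((c, p) :: rest) res
            = pvLoopB cl nd f
                (((nd.filter (fun kv => !p.contains kv.1)).map
                    (fun kv => (c + kv.2, p ++ [kv.1]))) ++ rest)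
                (if p = [] then res else res.insert c p) := by
          simp only [pvLoopB, if_neg hc, pvPush_eq]
        -- fuel bound for the new stack
        have hsum := pvChildren_sum nd p c hnd
        have hf : ((((nd.filter (fun kv => !p.contains kv.1)).map
              (fun kv => (c + kv.2, p ++ [kv.1]))) ++ rest).map
                (fun fr => pvW (pvCount nd fr.2))).sum ≤ f := by
          rw [List.map_append, List.sum_append, hsum]
          omega
        rw [hL, ih _ _ hf]
        -- identify the children's emissions with the recursive call's tail
        have hchild : ((nd.filter (fun kv => !p.contains kv.1)).map
              (fun kv => (c + kv.2, p ++ [kv.1]))).flatMap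
                (fun fr => pvEmitA cl nd (pvCount nd fr.2 + 1) fr.1 fr.2)
            = nd.flatMap (fun kv =>
                if p.contains kv.1 then []
                else pvEmitA cl nd (pvCount nd p) (c + kv.2) (p ++ [kv.1])) := by
          rw [pvFlatMap_if_filter, List.flatMap_map]
          apply pvFlatMap_congr
          intro kv hkv
          have h1 : pvCount nd (p ++ [kv.1]) = pvCount nd p - 1 := pvCount_snoc nd p kv hnd hkv
          have h2 : 0 < pvCount nd p := by
            unfold pvCount
            exact List.length_pos_of_mem hkv
          simp only [h1]
          congr 1
          omega
        -- unfold one level of A's emission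
        have hemit : pvEmitA cl nd (pvCount nd p + 1) c p
            = (if p = [] then [] else [(c, p)]) ++
              nd.flatMap (fun kv =>
                if p.contains kv.1 then []
                else pvEmitA cl nd (pvCount nd p) (c + kv.2) (p ++ [kv.1])) := by
          simp [pvEmitA, hc]
        rw [List.flatMap_cons, List.flatMap_append, hchild, hemit]
        rw [List.foldl_append, List.foldl_append, List.foldl_append]
        congr 1
        by_cases hp : p = [] <;> simp [hp]

-- ===== VERDICT (by name: the statement is the Claim_ definition above) =====
theorem get_permutations_under_cost_limit_spec : Claim_equal_get_permutations_under_cost_limit := by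
  intro cl nodes _
  unfold Spec_get_permutations_under_cost_limit
  unfold get_permutations_under_cost_limit get_permutations_under_cost_limit_alt
  have hnd : (((PySem.Dict.ofList nodes).items).map Prod.fst).Nodup := by
    have := PySem.Dict.nodup_keys_ofList (ps := nodes)
    simpa [PySem.Dict.keys] using this
  have hcount : pvCount ((PySem.Dict.ofList nodes).items) [] = ((PySem.Dict.ofList nodes).items).length := by
    simp [pvCount]
  have h := pvLoopB_eq cl ((PySem.Dict.ofList nodes).items) hnd
      (pvW ((PySem.Dict.ofList nodes).items).length)
      [(0, [])] PySem.Dict.empty (by simp [hcount])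
  simp only [List.flatMap_cons, List.flatMap_nil, List.append_nil, hcount] at h
  simp only [h]
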